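-- pv_equiv track=rewrite | github.com/912-Chereji-Iulia/Uni-Work | Year 1 - Sem 1/FP/a1-912-Chereji-Iulia/p3.py | date_to_days
-- ===== SOURCE A (Python) =====
-- def leap_year(y): #we check if a year is a leap one
--     if y%400==0:
--         return True
--     if y%100==0 :
--         return False
--     if y%4==0:
--         return True
--     return False
--
-- def date_to_days(y,mo,d): # we calculate the number of days since day 1, year 1
--     days=0
--     leapyears=leap_year(y-1)
--     days=366*leapyears+365*(y-1-leapyears)
--     for m in range(1,mo):
--         if(m==2):
--             days=days+28
--             if leap_year(y):
--                 days=days+1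
--         elif m in [1, 3, 5, 7, 8, 10, 12]:
--             days=days+31
--         else:
--             days=days+30
--     days=days+d
--     return days
-- ===== SOURCE B (Python) =====
-- def leap_year(y): #we check if a year is a leap one
--     if y%400==0:
--         return True
--     if y%100==0 :
--         return False
--     if y%4==0:
--         return True
--     return False
--
-- def date_to_days(y, mo, d):
--     # days contributed by the full years before y
--     leapyears = leap_year(y - 1)
--     days = 366 * leapyears + 365 * (y - 1 - leapyears)
--     # completed months: count each as 30 days, add one per 31-day month,
--     # and take two back for February (28), plus its leap day when due
--     days += 30 * (mo - 1) + sum(m < mo for m in (1, 3, 5, 7, 8, 10, 12))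
--     if mo > 2:
--         days -= 2
--         if leap_year(y):
--             days += 1
--     return days + d
-- ===== Notes on version B (the rewrite author's own statement) =====
-- stated objective: faster
-- what changed: The per-month accumulation loop is replaced by closed-form arithmetic (30 days per completed month, plus one per 31-day month passed, minus two for February with its leap-day adjustment); Pre_ excludes mo < 1, non-calendar months on which A's empty loop and B's extrapolated formula each return an accidental value.
-- outside the precondition, e.g. on date_to_days(2000, 0, 5): A returns 729640, B returns 729610
import Mathlib
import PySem

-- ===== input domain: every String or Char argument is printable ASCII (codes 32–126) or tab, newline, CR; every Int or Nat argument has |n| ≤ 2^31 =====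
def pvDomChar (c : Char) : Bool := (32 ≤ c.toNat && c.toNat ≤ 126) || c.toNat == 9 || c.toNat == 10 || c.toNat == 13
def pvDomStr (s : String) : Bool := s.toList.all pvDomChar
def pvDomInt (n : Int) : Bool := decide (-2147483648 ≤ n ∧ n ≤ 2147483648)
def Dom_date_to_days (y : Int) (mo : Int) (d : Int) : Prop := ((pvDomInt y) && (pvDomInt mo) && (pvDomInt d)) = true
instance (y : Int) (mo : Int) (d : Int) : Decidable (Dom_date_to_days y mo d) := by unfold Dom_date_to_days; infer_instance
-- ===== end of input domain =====

set_option maxRecDepth 4000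
set_option maxHeartbeats 1000000


-- B replaces the month loop with closed-form arithmetic; proved equal to A for all months mo ≥ 1.
-- ===== PORT A =====
-- shared helper: both Source A and Source B define the identical leap_year
def pvLeap (y : Int) : Bool :=
  if PySem.Int.mod y 400 = 0 then true
  else if PySem.Int.mod y 100 = 0 then false
  else if PySem.Int.mod y 4 = 0 then true
  else false

def date_to_days (y : Int) (mo : Int) (d : Int) : Int :=
  let leapyears : Int := if pvLeap (y - 1) then 1 else 0  -- Python bool used arithmetically
  let days := 366 * leapyears + 365 * (y - 1 - leapyears)
  let days := (PySem.List.pyRange 1 mo 1).foldl (fun days m =>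
    if m = 2 then
      let days := days + 28
      if pvLeap y then days + 1 else days
    else if ([1, 3, 5, 7, 8, 10, 12] : List Int).contains m then days + 31
    else days + 30) days
  days + d

-- ===== PORT B =====
def date_to_days_alt (y : Int) (mo : Int) (d : Int) : Int :=
  let leapyears : Int := if pvLeap (y - 1) then 1 else 0
  let days := 366 * leapyears + 365 * (y - 1 - leapyears)
  -- sum(m < mo for m in (1,3,5,7,8,10,12)) : Python sums the booleans
  let days := days + 30 * (mo - 1)
    + (([1, 3, 5, 7, 8, 10, 12] : List Int).map (fun m => if m < mo then (1 : Int) else 0)).sum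
  let days := if 2 < mo then
      (let days := days - 2; if pvLeap y then days + 1 else days)
    else days
  days + d

-- ===== PRECONDITION & SPEC =====
-- Pre_ excludes mo < 1 (non-calendar months): there A's empty loop and B's extrapolated
-- closed formula each return an accidental value, and neither is specified.
def Pre_date_to_days (y : Int) (mo : Int) (d : Int) : Prop := 1 ≤ mo
instance (y : Int) (mo : Int) (d : Int) : Decidable (Pre_date_to_days y mo d) := by unfold Pre_date_to_days; infer_instance
def pvWitness_date_to_days : Int × Int × Int := (2000, 3, 1)

def Spec_date_to_days (y : Int) (mo : Int) (d : Int) (out : Int) : Prop := out = date_to_days_alt y mo d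
instance (y : Int) (mo : Int) (d : Int) (out : Int) : Decidable (Spec_date_to_days y mo d out) := by unfold Spec_date_to_days; infer_instance

-- ===== CLAIM (what is proved, stated in full; the proofs are below) =====
def Claim_equal_date_to_days : Prop := ∀ (y : Int) (mo : Int) (d : Int), Dom_date_to_days y mo d → Pre_date_to_days y mo d → Spec_date_to_days y mo d (date_to_days y mo d)

-- ===== LEMMAS AND PROOFS =====
lemma cnt_big (mo : Int) (h : 12 < mo) :
    (([1, 3, 5, 7, 8, 10, 12] : List Int).map (fun m => if m < mo then (1 : Int) else 0)).sum = 7 := by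
  have h1 : (1 : Int) < mo := by omega
  have h3 : (3 : Int) < mo := by omega
  have h5 : (5 : Int) < mo := by omega
  have h7 : (7 : Int) < mo := by omega
  have h8 : (8 : Int) < mo := by omega
  have h10 : (10 : Int) < mo := by omega
  have h12 : (12 : Int) < mo := by omega
  norm_num [List.map, h1, h3, h5, h7, h8, h10, h12]

lemma loop_eq (y mo init : Int) (h : 1 ≤ mo) :
    (PySem.List.pyRange 1 mo 1).foldl (fun days m =>
      if m = 2 then
        let days := days + 28
        if pvLeap y then days + 1 else days
      else if ([1, 3, 5, 7, 8, 10, 12] : List Int).contains m then days + 31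
      else days + 30) init
    = init + 30 * (mo - 1)
        + (([1, 3, 5, 7, 8, 10, 12] : List Int).map (fun m => if m < mo then (1 : Int) else 0)).sum
        + (if 2 < mo then (if pvLeap y then -1 else -2) else 0) := by
  induction mo, h using Int.le_induction with
  | base =>
    rw [PySem.List.pyRange_one_eq_nil (by omega)]
    norm_num [List.map]
  | succ mo hmo ih =>
    rw [PySem.List.pyRange_one_succ_right hmo, List.foldl_append, ih]
    rcases (by omega : (1 ≤ mo ∧ mo ≤ 12) ∨ 12 < mo) with ⟨_, h12⟩ | h12
    · interval_cases mo <;> by_cases hl : pvLeap y = true <;>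
        simp only [List.foldl_cons, List.foldl_nil, List.contains_eq_mem, List.map,
          List.sum_cons, List.sum_nil, hl] <;> norm_num <;> omega
    · have hc : ([1, 3, 5, 7, 8, 10, 12] : List Int).contains mo = false := by
        simp; omega
      rw [List.foldl_cons, List.foldl_nil, if_neg (by omega : ¬ mo = 2), hc,
        cnt_big mo (by omega), cnt_big (mo + 1) (by omega)]
      simp only [Bool.false_eq_true, if_false]
      split_ifs <;> omega

theorem date_to_days_spec : Claim_equal_date_to_days := by
  intro y mo d _ hpre
  show date_to_days y mo d = date_to_days_alt y mo d
  simp only [date_to_days, date_to_days_alt, loop_eq y mo _ hpre]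
  split_ifs <;> omega
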